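-- pv_equiv track=rewrite | github.com/R210175/DSP | circ_conv_comp.py | circ_reverse
-- ===== SOURCE A (Python) =====
-- def circ_reverse(x):
-- 	x_r=[]
-- 	N=len(x)
-- 	for i in range(N):
-- 		if (i==0):
-- 			x_r.append(x[i])
-- 		else:
-- 			x_r.append(x[N-i])
-- 	return x_r
-- ===== SOURCE B (Python) =====
-- def circ_reverse(x):
--     # reverse the whole list, then rotate it right by one:
--     # the last element of the reversal (the original head) moves to the front
--     r = x[::-1]
--     if r:
--         r.insert(0, r.pop())
--     return r
-- ===== Notes on version B (the rewrite author's own statement) =====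
-- stated objective: alternative
-- what changed: Instead of A's index loop that keeps position 0 and appends x[N-i], B reverses the whole list and then rotates it right by one (pop the last element, insert it at the front).
import Mathlib
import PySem

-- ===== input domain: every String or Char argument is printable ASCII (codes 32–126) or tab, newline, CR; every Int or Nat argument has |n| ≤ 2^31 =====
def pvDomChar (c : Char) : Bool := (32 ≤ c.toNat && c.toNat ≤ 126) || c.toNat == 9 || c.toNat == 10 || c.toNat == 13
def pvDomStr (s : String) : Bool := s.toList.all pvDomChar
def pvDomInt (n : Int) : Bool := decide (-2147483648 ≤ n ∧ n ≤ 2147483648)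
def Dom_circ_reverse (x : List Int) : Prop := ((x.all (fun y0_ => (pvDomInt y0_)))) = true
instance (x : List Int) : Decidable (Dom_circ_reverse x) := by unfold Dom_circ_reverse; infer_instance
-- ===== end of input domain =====

-- B reverses the whole list and then rotates it right by one (pop last, insert at front),
-- instead of A's index loop over x[N-i] (objective: alternative, same cost).

-- ===== PORT A =====
-- index loop: every access x[i] / x[N-i] is in range (i=0, or 1 ≤ N-i ≤ N-1), so pyGetD with default 0 is exact
def circ_reverse (x : List Int) : List Int :=
  let N : Int := x.length
  (PySem.List.pyRange 0 N 1).foldl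
    (fun x_r i => if i == 0 then x_r ++ [PySem.List.pyGetD x i 0]
                  else x_r ++ [PySem.List.pyGetD x (N - i) 0]) []

-- ===== PORT B =====
-- 'r = x[::-1]; if r: r.insert(0, r.pop()); return r'
def circ_reverse_alt (x : List Int) : List Int :=
  let r := x.reverse
  if r.isEmpty then r
  else
    match PySem.List.pop? r (-1) with
    | some (v, r') => PySem.List.insert r' 0 v
    | none => r

-- ===== PRECONDITION & SPEC =====
def Spec_circ_reverse (x : List Int) (out : List Int) : Prop := out = circ_reverse_alt x
instance (x : List Int) (out : List Int) : Decidable (Spec_circ_reverse x out) := by unfold Spec_circ_reverse; infer_instance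

-- ===== CLAIM (what is proved, stated in full; the proofs are below) =====
def Claim_equal_circ_reverse : Prop := ∀ (x : List Int), Dom_circ_reverse x → Spec_circ_reverse x (circ_reverse x)

-- ===== LEMMAS AND PROOFS =====

theorem circ_reverse_cons (h : Int) (t : List Int) :
    circ_reverse (h :: t) = h :: t.reverse := by
  have hN : (0 : Int) < ((h :: t).length : Int) := by
    simp
  rw [circ_reverse]
  have hfun : (fun (x_r : List Int) (i : Int) =>
      if (i == 0) = true then x_r ++ [PySem.List.pyGetD (h :: t) i 0]
      else x_r ++ [PySem.List.pyGetD (h :: t) (((h :: t).length : Int) - i) 0])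
      = (fun (x_r : List Int) (i : Int) => x_r ++
        [if (i == 0) = true then PySem.List.pyGetD (h :: t) i 0
         else PySem.List.pyGetD (h :: t) (((h :: t).length : Int) - i) 0]) := by
    funext x_r i; split <;> rfl
  rw [hfun]
  rw [PySem.List.foldl_append_singleton_eq_map, PySem.List.pyRange_one_cons hN]
  simp only [List.map_cons, List.nil_append, zero_add]
  have h0 : PySem.List.pyGetD (h :: t) 0 0 = h := by
    simp [PySem.List.pyGetD, PySem.List.pyGet?, PySem.List.pyIdx?]
  rw [h0]
  congr 1
  have hcong : ((PySem.List.pyRange 1 ((h :: t).length : Int) 1).map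
      (fun i => if i == 0 then PySem.List.pyGetD (h :: t) i 0
                else PySem.List.pyGetD (h :: t) (((h :: t).length : Int) - i) 0))
      = (PySem.List.pyRange 1 ((h :: t).length : Int) 1).map
      (fun i => PySem.List.pyGetD (h :: t) (((h :: t).length : Int) - i) 0) := by
    apply List.map_congr_left
    intro i hi
    rw [PySem.List.mem_pyRange_one] at hi
    have : ¬ (i == 0) = true := by simp; omega
    simp [this]
  rw [hcong, PySem.List.pyRange_one]
  rw [List.map_map]
  apply List.ext_getElem
  · simp
  · intro k hk1 hk2
    simp only [List.getElem_map, List.getElem_range, Function.comp_apply]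
    have hlen : ((h :: t).length : Int) = (t.length : Int) + 1 := by simp
    have hkt : k < t.length := by
      simp at hk1; omega
    have hidx : ((h :: t).length : Int) - (1 + (k : Int)) = ((t.length - k : Nat) : Int) := by
      rw [hlen]; omega
    rw [hidx]
    rw [PySem.List.pyGetD_natCast]
    have hrange : t.length - k < (h :: t).length := by simp
    simp only [List.getD_eq_getElem?_getD, List.getElem?_eq_getElem hrange]
    have : (h :: t)[t.length - k] = t[t.length - 1 - k] := by
      have hpos : 0 < t.length - k := by omega
      rcases Nat.exists_eq_add_of_lt hpos with _
      have : t.length - k = (t.length - 1 - k) + 1 := by omega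
      simp [this]
    rw [this]
    simp only [List.getElem_reverse]
    congr 1

theorem circ_reverse_alt_cons (h : Int) (t : List Int) :
    circ_reverse_alt (h :: t) = h :: t.reverse := by
  unfold circ_reverse_alt
  simp [List.isEmpty_iff, PySem.List.pop?_last, PySem.List.insert, PySem.List.sliceIndices]

-- ===== VERDICT (by name: the statement is the Claim_ definition above) =====
theorem circ_reverse_spec : Claim_equal_circ_reverse := by
  intro x _
  unfold Spec_circ_reverse
  cases x with
  | nil => rfl
  | cons h t => rw [circ_reverse_cons, circ_reverse_alt_cons]
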